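-- pv_equiv track=rewrite | github.com/multivac61/aoc | year/2021.py | simulate_sea_cucumbers
-- ===== SOURCE A (Python) =====
-- def simulate_sea_cucumbers(lines):
--     """Simulate sea cucumber movement until they stop."""
--     grid = [list(line) for line in lines]
--     height, width = len(grid), len(grid[0])
--     step = 0
--
--     while True:
--         step += 1
--         moved = False
--
--         # Move east-facing cucumbers
--         new_grid = [row[:] for row in grid]
--         for y in range(height):
--             for x in range(width):
--                 if grid[y][x] == ">" and grid[y][(x + 1) % width] == ".":
--                     new_grid[y][x] = "."
--                     new_grid[y][(x + 1) % width] = ">"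
--                     moved = True
--
--         grid = new_grid
--
--         # Move south-facing cucumbers
--         new_grid = [row[:] for row in grid]
--         for y in range(height):
--             for x in range(width):
--                 if grid[y][x] == "v" and grid[(y + 1) % height][x] == ".":
--                     new_grid[y][x] = "."
--                     new_grid[(y + 1) % height][x] = "v"
--                     moved = True
--
--         grid = new_grid
--
--         if not moved:
--             return step
-- ===== SOURCE B (Python) =====
-- def _phase(cucs, occ, mv):
--     """Move every cucumber in `cucs` whose toroidal target `mv(p)` is unoccupied."""
--     new, moved = set(), False
--     for p in cucs:
--         t = mv(p)
--         if t in occ: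
--             new.add(p)
--         else:
--             new.add(t)
--             moved = True
--     return new, moved
--
--
-- def simulate_sea_cucumbers(lines):
--     """Sparse-set simulation: track east/south cucumber coordinate sets (plus static
--     blockers) and move whole sets per phase; no dense grid is kept after parsing."""
--     h, w = len(lines), len(lines[0])
--     east, south, walls = set(), set(), set()
--     for y in range(h):
--         for x in range(w):
--             c = lines[y][x]
--             if c == '>':
--                 east.add((y, x))
--             elif c == 'v':
--                 south.add((y, x))
--             elif c != '.':
--                 walls.add((y, x))
--     step = 0
--     while True:
--         step += 1
--         east, m1 = _phase(east, east | south | walls, lambda p: (p[0], (p[1] + 1) % w))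
--         south, m2 = _phase(south, east | south | walls, lambda p: ((p[0] + 1) % h, p[1]))
--         if not (m1 or m2):
--             return step
-- ===== Notes on version B (the rewrite author's own statement) =====
-- stated objective: alternative
-- what changed: Replaces A's dense copy-and-mutate character grid with a sparse coordinate-set representation: east/south cucumber positions plus static blockers are kept as sets, each phase builds a new position set by moving every cucumber whose toroidal target is not in the occupied set, and the grid is never materialised after parsing.
import Mathlib
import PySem

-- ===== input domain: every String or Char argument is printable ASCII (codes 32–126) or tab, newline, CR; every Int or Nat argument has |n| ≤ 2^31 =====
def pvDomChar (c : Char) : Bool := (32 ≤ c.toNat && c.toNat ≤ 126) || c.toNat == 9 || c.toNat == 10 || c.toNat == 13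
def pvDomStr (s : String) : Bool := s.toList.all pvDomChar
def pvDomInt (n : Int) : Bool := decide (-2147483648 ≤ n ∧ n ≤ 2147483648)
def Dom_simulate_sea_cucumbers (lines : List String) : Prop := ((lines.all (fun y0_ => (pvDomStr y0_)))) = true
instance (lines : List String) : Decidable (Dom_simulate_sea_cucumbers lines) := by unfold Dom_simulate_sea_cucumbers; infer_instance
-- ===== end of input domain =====

-- B replaces A's dense copy-and-mutate character grid by a sparse coordinate-set state
-- (east/south cucumber sets plus static blockers) moved set-wise per phase; same step count
-- proved on all inputs where A terminates (Pre_).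


-- ===== PORT A =====
-- grid[y][x] with default ' ' (a char never compared against); Pre_ keeps all real reads in range
def pvRead (g : List (List Char)) (y x : Nat) : Char := (g.getD y []).getD x ' '

-- new_grid[y][x] = c (List.set/modify are no-ops out of range; Pre_ keeps writes in range)
def pvWrite (g : List (List Char)) (y x : Nat) (c : Char) : List (List Char) :=
  g.modify y (fun r => r.set x c)

-- the east pass: reads the captured grid g, writes into the copy (acc), ORs the moved flag
def pvEastA (h w : Nat) (g : List (List Char)) : List (List Char) × Bool :=
  (List.range h).foldl (fun acc y =>
    (List.range w).foldl (fun acc x =>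
      if pvRead g y x == '>' && pvRead g y ((x + 1) % w) == '.' then
        (pvWrite (pvWrite acc.1 y x '.') y ((x + 1) % w) '>', true)
      else acc) acc) (g, false)

-- the south pass; the moved flag m0 continues from the east pass as in the Python
def pvSouthA (h w : Nat) (g : List (List Char)) (m0 : Bool) : List (List Char) × Bool :=
  (List.range h).foldl (fun acc y =>
    (List.range w).foldl (fun acc x =>
      if pvRead g y x == 'v' && pvRead g ((y + 1) % h) x == '.' then
        (pvWrite (pvWrite acc.1 y x '.') ((y + 1) % h) x 'v', true)
      else acc) acc) (g, m0)

-- `while True`: fuel 4^(h*w)+1 exceeds the index of the first fixpoint whenever the Python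
-- terminates (each of the h*w scanned cells takes at most 4 values, and the states before the
-- first no-move step are pairwise distinct); Pre_ admits exactly the terminating inputs, so the
-- fuel-exhausted branch is never taken there.
def pvGoA (h w : Nat) : Nat → Int → List (List Char) → Int
  | 0, step, _ => step
  | fuel + 1, step, g =>
      let e := pvEastA h w g
      let s := pvSouthA h w e.1 e.2
      if s.2 then pvGoA h w fuel (step + 1) s.1 else step + 1

def simulate_sea_cucumbers (lines : List String) : Int :=
  let grid := lines.map (fun l => l.toList)
  let height := grid.length
  let width := (grid.headD []).length    -- len(grid[0]); IndexError on [] is excluded by Pre_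
  pvGoA height width (4 ^ (height * width) + 1) 0 grid

-- ===== PORT B =====
-- `_phase(cucs, occ, mv)`: iterate over the cucumber set, moving each to mv(p) iff free;
-- the set is consumed order-independently (new set + OR'd flag), so the fold order is exact
def pvPhase (cucs occ : List (Nat × Nat)) (mv : Nat × Nat → Nat × Nat) :
    List (Nat × Nat) × Bool :=
  cucs.foldl (fun acc p =>
    let t := mv p
    if PySem.Set.contains occ t then (PySem.Set.add acc.1 p, acc.2)
    else (PySem.Set.add acc.1 t, true)) (PySem.Set.empty, false)

-- the parsing loops: lines[y][x] sorts each cell into east/south/walls; reads are in range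
-- under Pre_, the getD default ' ' is never produced there
def pvBuildB (lines : List String) (h w : Nat) :
    List (Nat × Nat) × List (Nat × Nat) × List (Nat × Nat) :=
  (List.range h).foldl (fun acc y =>
    (List.range w).foldl (fun acc x =>
      let c := ((lines.getD y "").toList).getD x ' '
      if c == '>' then (PySem.Set.add acc.1 (y, x), acc.2.1, acc.2.2)
      else if c == 'v' then (acc.1, PySem.Set.add acc.2.1 (y, x), acc.2.2)
      else if c != '.' then (acc.1, acc.2.1, PySem.Set.add acc.2.2 (y, x))
      else acc) acc) (PySem.Set.empty, PySem.Set.empty, PySem.Set.empty)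

-- B's `while True`, with the same termination fuel as A's port; walls are static
def pvGoB (h w : Nat) :
    Nat → Int → List (Nat × Nat) → List (Nat × Nat) → List (Nat × Nat) → Int
  | 0, step, _, _, _ => step
  | fuel + 1, step, east, south, walls =>
      let e := pvPhase east (PySem.Set.union (PySem.Set.union east south) walls)
                 (fun p => (p.1, (p.2 + 1) % w))
      let s := pvPhase south (PySem.Set.union (PySem.Set.union e.1 south) walls)
                 (fun p => ((p.1 + 1) % h, p.2))
      if e.2 || s.2 then pvGoB h w fuel (step + 1) e.1 s.1 walls else step + 1

def simulate_sea_cucumbers_alt (lines : List String) : Int :=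
  let h := lines.length
  let w := (lines.headD "").toList.length   -- len(lines[0]); IndexError on [] excluded by Pre_
  let t := pvBuildB lines h w
  pvGoB h w (4 ^ (h * w) + 1) 0 t.1 t.2.1 t.2.2

-- ===== PRECONDITION & SPEC =====
-- one full step of the simulation as an independent pointwise rule (used by Pre_ only)
def pvStepP (h w : Nat) (g : List (List Char)) : List (List Char) :=
  let e := g.map (fun r => (List.range w).map (fun x =>
    let c := r.getD x ' '
    if c == '>' && r.getD ((x + 1) % w) ' ' == '.' then '.'
    else if c == '.' && r.getD ((x + w - 1) % w) ' ' == '>' then '>' else c))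
  (List.range h).map (fun y => (List.range w).map (fun x =>
    let c := (e.getD y []).getD x ' '
    if c == 'v' && (e.getD ((y + 1) % h) []).getD x ' ' == '.' then '.'
    else if c == '.' && (e.getD ((y + h - 1) % h) []).getD x ' ' == 'v' then 'v' else c))

-- does the simulation reach a fixpoint (A terminates)?  false as soon as a state repeats
def pvPreTerm (h w : Nat) : Nat → List (List (List Char)) → List (List Char) → Bool
  | 0, _, _ => false
  | fuel + 1, seen, g =>
      let g' := pvStepP h w g
      if g' == g then true
      else if seen.contains g then false
      else pvPreTerm h w fuel (g :: seen) g'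

-- Pre_ excludes (i) the empty list and rows shorter than the first row, where the Python A
-- raises IndexError, and (ii) the grids on which the simulation never stops, where A loops
-- forever (e.g. [">."]); the termination clause is a closed simulation of the step rule with
-- cycle detection, independent of both ports.
def Pre_simulate_sea_cucumbers (lines : List String) : Prop :=
  lines ≠ [] ∧
  (∀ l ∈ lines, (lines.headD "").toList.length ≤ l.toList.length) ∧
  pvPreTerm lines.length (lines.headD "").toList.length
      (4 ^ (lines.length * (lines.headD "").toList.length) + 1) []
      (lines.map (fun l => l.toList.take (lines.headD "").toList.length)) = true

instance (lines : List String) : Decidable (Pre_simulate_sea_cucumbers lines) := by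
  unfold Pre_simulate_sea_cucumbers; infer_instance

def pvWitness_simulate_sea_cucumbers : List String := [">v>", "vv>", "..>"]

def Spec_simulate_sea_cucumbers (lines : List String) (out : Int) : Prop := out = simulate_sea_cucumbers_alt lines
instance (lines : List String) (out : Int) : Decidable (Spec_simulate_sea_cucumbers lines out) := by unfold Spec_simulate_sea_cucumbers; infer_instance

-- ===== CLAIM (what is proved, stated in full; the proofs are below) =====
def Claim_equal_simulate_sea_cucumbers : Prop := ∀ (lines : List String), Dom_simulate_sea_cucumbers lines → Pre_simulate_sea_cucumbers lines → Spec_simulate_sea_cucumbers lines (simulate_sea_cucumbers lines)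

-- ===== LEMMAS AND PROOFS =====

-- ---- the write list of a mutation pass ----
def pvApplyW (g : List (List Char)) (l : List ((Nat × Nat) × Char)) : List (List Char) :=
  l.foldl (fun g pc => pvWrite g pc.1.1 pc.1.2 pc.2) g

theorem pv_foldl_applyW {i : Type} (ws : i → List ((Nat × Nat) × Char)) :
    ∀ (L : List i) (g : List (List Char)),
      L.foldl (fun g z => pvApplyW g (ws z)) g = pvApplyW g (L.flatMap ws) := by
  intro L
  induction L with
  | nil => intro g; rfl
  | cons z t ih =>
    intro g
    simp only [List.foldl_cons, List.flatMap_cons, pvApplyW, List.foldl_append]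
    exact ih (List.foldl (fun g pc => pvWrite g pc.1.1 pc.1.2 pc.2) g (ws z))

theorem pv_getElem?_write (g : List (List Char)) (y x : Nat) (c : Char) (z : Nat) :
    (pvWrite g y x c)[z]? = if y = z then (g[z]?).map (fun r => r.set x c) else g[z]? := by
  simp only [pvWrite, List.getElem?_modify]
  by_cases h : y = z
  · simp [h, Option.map]
  · simp only [h, if_false]
    cases g[z]? <;> simp

theorem pv_write_length (g : List (List Char)) (y x : Nat) (c : Char) :
    (pvWrite g y x c).length = g.length := by
  simp [pvWrite, List.length_modify]

theorem pv_write_rowlen (g : List (List Char)) (y x : Nat) (c : Char) (z : Nat) :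
    ((pvWrite g y x c).getD z []).length = (g.getD z []).length := by
  rw [List.getD_eq_getElem?_getD, List.getD_eq_getElem?_getD, pv_getElem?_write]
  by_cases h : y = z
  · simp only [h, if_true]
    cases g[z]? <;> simp
  · simp [h]

theorem pvRead_write_self (g : List (List Char)) {y x : Nat} (c : Char)
    (hy : y < g.length) (hx : x < (g.getD y []).length) :
    pvRead (pvWrite g y x c) y x = c := by
  have hg : g[y]? = some (g.getD y []) := by
    rw [List.getD_eq_getElem _ _ hy]; exact List.getElem?_eq_getElem hy
  have hrow : (pvWrite g y x c).getD y [] = (g.getD y []).set x c := by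
    rw [List.getD_eq_getElem?_getD, pv_getElem?_write, if_pos rfl, hg]; rfl
  rw [pvRead, hrow, List.getD_eq_getElem?_getD, List.getElem?_set, if_pos rfl, if_pos hx]
  rfl

theorem pvRead_write_ne (g : List (List Char)) {y x z j : Nat} (c : Char)
    (h : ¬(z = y ∧ j = x)) :
    pvRead (pvWrite g y x c) z j = pvRead g z j := by
  by_cases hz : y = z
  · subst hz
    have hj : ¬ x = j := fun e => h ⟨rfl, e.symm⟩
    cases hg : g[y]? with
    | none =>
      have h1 : (pvWrite g y x c).getD y [] = ([] : List Char) := by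
        rw [List.getD_eq_getElem?_getD, pv_getElem?_write, if_pos rfl, hg]; rfl
      have h2 : g.getD y [] = ([] : List Char) := by rw [List.getD_eq_getElem?_getD, hg]; rfl
      rw [pvRead, pvRead, h1, h2]
    | some r =>
      have h1 : (pvWrite g y x c).getD y [] = r.set x c := by
        rw [List.getD_eq_getElem?_getD, pv_getElem?_write, if_pos rfl, hg]; rfl
      have h2 : g.getD y [] = r := by rw [List.getD_eq_getElem?_getD, hg]; rfl
      rw [pvRead, pvRead, h1, h2, List.getD_eq_getElem?_getD, List.getD_eq_getElem?_getD,
        List.getElem?_set, if_neg hj]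
  · have h1 : (pvWrite g y x c).getD z [] = g.getD z [] := by
      rw [List.getD_eq_getElem?_getD, pv_getElem?_write, if_neg hz, ← List.getD_eq_getElem?_getD]
    rw [pvRead, pvRead, h1]

theorem pv_applyW_length :
    ∀ (l : List ((Nat × Nat) × Char)) (g : List (List Char)),
      (pvApplyW g l).length = g.length := by
  intro l
  induction l with
  | nil => intro g; rfl
  | cons pc t ih =>
    intro g
    show (pvApplyW (pvWrite g pc.1.1 pc.1.2 pc.2) t).length = g.length
    rw [ih, pv_write_length]

theorem pv_applyW_rowlen :
    ∀ (l : List ((Nat × Nat) × Char)) (g : List (List Char)) (z : Nat),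
      ((pvApplyW g l).getD z []).length = ((g.getD z []).length) := by
  intro l
  induction l with
  | nil => intro g z; rfl
  | cons pc t ih =>
    intro g z
    show ((pvApplyW (pvWrite g pc.1.1 pc.1.2 pc.2) t).getD z []).length = _
    rw [ih, pv_write_rowlen]

theorem pvRead_applyW_not_mem {z j : Nat} :
    ∀ (l : List ((Nat × Nat) × Char)) (g : List (List Char)),
      (∀ c, ((z, j), c) ∉ l) → pvRead (pvApplyW g l) z j = pvRead g z j := by
  intro l
  induction l with
  | nil => intro g _; rfl
  | cons pc t ih =>
    intro g hnm
    show pvRead (pvApplyW (pvWrite g pc.1.1 pc.1.2 pc.2) t) z j = _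
    rw [ih _ (fun c hc => hnm c (List.mem_cons_of_mem _ hc))]
    apply pvRead_write_ne
    rintro ⟨rfl, rfl⟩
    exact hnm pc.2 (by simp)

theorem pvRead_applyW_mem {z j : Nat} {c : Char} :
    ∀ (l : List ((Nat × Nat) × Char)) (g : List (List Char)),
      ((z, j), c) ∈ l → (∀ c', ((z, j), c') ∈ l → c' = c) →
      z < g.length → j < (g.getD z []).length →
      pvRead (pvApplyW g l) z j = c := by
  intro l
  induction l with
  | nil => intro g hm; exact absurd hm (List.not_mem_nil)
  | cons pc t ih =>
    intro g hm hcons hz hj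
    show pvRead (pvApplyW (pvWrite g pc.1.1 pc.1.2 pc.2) t) z j = c
    by_cases hpos : pc.1 = (z, j)
    · have hval : pc.2 = c := hcons pc.2 (by rw [← hpos]; simp)
      by_cases ht : ((z, j), c) ∈ t
      · exact ih _ ht (fun c' hc' => hcons c' (List.mem_cons_of_mem _ hc'))
          (by rw [pv_write_length]; exact hz) (by rw [pv_write_rowlen]; exact hj)
      · have hnone : ∀ c', ((z, j), c') ∉ t := by
          intro c' hc'
          have := hcons c' (List.mem_cons_of_mem _ hc')
          exact ht (this ▸ hc')
        rw [pvRead_applyW_not_mem t _ hnone]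
        have h1 : pc.1.1 = z := by rw [hpos]
        have h2 : pc.1.2 = j := by rw [hpos]
        rw [h1, h2, hval]
        exact pvRead_write_self g c hz hj
    · have hmt : ((z, j), c) ∈ t := by
        rcases List.mem_cons.mp hm with he | ht
        · exact absurd (congrArg Prod.fst he.symm) hpos
        · exact ht
      refine ih _ hmt (fun c' hc' => hcons c' (List.mem_cons_of_mem _ hc')) ?_ ?_
      · rw [pv_write_length]; exact hz
      · rw [pv_write_rowlen]; exact hj

-- ---- the per-cell rules and write lists of A's two passes ----
def pvSrcRow (w : Nat) (r : List Char) (x : Nat) : Bool :=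
  r.getD x ' ' == '>' && r.getD ((x + 1) % w) ' ' == '.'

def pvTgtRow (w : Nat) (r : List Char) (x : Nat) : Bool :=
  r.getD x ' ' == '.' && r.getD ((x + w - 1) % w) ' ' == '>'

def pvERow (w : Nat) (r : List Char) (x : Nat) : Char :=
  if pvSrcRow w r x then '.' else if pvTgtRow w r x then '>' else r.getD x ' '

def pvSrcS (g : List (List Char)) (h y x : Nat) : Bool :=
  pvRead g y x == 'v' && pvRead g ((y + 1) % h) x == '.'

def pvTgtS (g : List (List Char)) (h y x : Nat) : Bool :=
  pvRead g y x == '.' && pvRead g ((y + h - 1) % h) x == 'v'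

def pvSRule (g : List (List Char)) (h y x : Nat) : Char :=
  if pvSrcS g h y x then '.' else if pvTgtS g h y x then 'v' else pvRead g y x

def pvEW (g : List (List Char)) (h w : Nat) : List ((Nat × Nat) × Char) :=
  (List.range h).flatMap (fun y => (List.range w).flatMap (fun x =>
    if pvSrcRow w (g.getD y []) x then [((y, x), '.'), ((y, (x + 1) % w), '>')] else []))

def pvSW (g : List (List Char)) (h w : Nat) : List ((Nat × Nat) × Char) :=
  (List.range h).flatMap (fun y => (List.range w).flatMap (fun x =>
    if pvSrcS g h y x then [((y, x), '.'), (((y + 1) % h, x), 'v')] else []))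

theorem pv_mem_EW {g : List (List Char)} {h w y j : Nat} {c : Char} :
    ((y, j), c) ∈ pvEW g h w ↔
      ∃ x, y < h ∧ x < w ∧ pvSrcRow w (g.getD y []) x = true ∧
        ((j = x ∧ c = '.') ∨ (j = (x + 1) % w ∧ c = '>')) := by
  simp only [pvEW, List.mem_flatMap, List.mem_range, List.mem_ite_nil_right, List.mem_cons,
    List.not_mem_nil, or_false, Prod.mk.injEq]
  constructor
  · rintro ⟨y', hy', x, hx, hs, hc⟩
    rcases hc with ⟨⟨hy1, hj⟩, hcv⟩ | ⟨⟨hy1, hj⟩, hcv⟩ <;> subst hy1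
    · exact ⟨x, hy', hx, hs, Or.inl ⟨hj, hcv⟩⟩
    · exact ⟨x, hy', hx, hs, Or.inr ⟨hj, hcv⟩⟩
  · rintro ⟨x, hy, hx, hs, hc⟩
    refine ⟨y, hy, x, hx, hs, ?_⟩
    rcases hc with ⟨hj, hcv⟩ | ⟨hj, hcv⟩
    · exact Or.inl ⟨⟨rfl, hj⟩, hcv⟩
    · exact Or.inr ⟨⟨rfl, hj⟩, hcv⟩

theorem pv_mem_SW {g : List (List Char)} {h w z j : Nat} {c : Char} :
    ((z, j), c) ∈ pvSW g h w ↔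
      ∃ y x, y < h ∧ x < w ∧ pvSrcS g h y x = true ∧
        ((z = y ∧ j = x ∧ c = '.') ∨ (z = (y + 1) % h ∧ j = x ∧ c = 'v')) := by
  simp only [pvSW, List.mem_flatMap, List.mem_range, List.mem_ite_nil_right, List.mem_cons,
    List.not_mem_nil, or_false, Prod.mk.injEq]
  constructor
  · rintro ⟨y, hy, x, hx, hs, hc⟩
    rcases hc with ⟨⟨hz, hj⟩, hcv⟩ | ⟨⟨hz, hj⟩, hcv⟩
    · exact ⟨y, x, hy, hx, hs, Or.inl ⟨hz, hj, hcv⟩⟩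
    · exact ⟨y, x, hy, hx, hs, Or.inr ⟨hz, hj, hcv⟩⟩
  · rintro ⟨y, x, hy, hx, hs, hc⟩
    refine ⟨y, hy, x, hx, hs, ?_⟩
    rcases hc with ⟨hz, hj, hcv⟩ | ⟨hz, hj, hcv⟩
    · exact Or.inl ⟨⟨hz, hj⟩, hcv⟩
    · exact Or.inr ⟨⟨hz, hj⟩, hcv⟩

-- ---- torus-neighbour arithmetic ----
theorem pv_mod_pred_lt {w j : Nat} (hj : j < w) : (j + w - 1) % w < w :=
  Nat.mod_lt _ (by omega)

theorem pv_mod_pred_succ {w j : Nat} (hj : j < w) : ((j + w - 1) % w + 1) % w = j := by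
  have hw : 0 < w := by omega
  by_cases h0 : j = 0
  · subst h0
    have h1 : (0 + w - 1) % w = w - 1 := by
      have : 0 + w - 1 = w - 1 := by omega
      rw [this]; exact Nat.mod_eq_of_lt (by omega)
    rw [h1]
    have h2 : w - 1 + 1 = w := by omega
    rw [h2, Nat.mod_self]
  · have h1 : j + w - 1 = (j - 1) + w := by omega
    have h2 : (j + w - 1) % w = j - 1 := by
      rw [h1, Nat.add_mod_right]; exact Nat.mod_eq_of_lt (by omega)
    rw [h2]
    have h3 : j - 1 + 1 = j := by omega
    rw [h3]; exact Nat.mod_eq_of_lt hj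

theorem pv_mod_succ_pred {w x : Nat} (hx : x < w) : ((x + 1) % w + w - 1) % w = x := by
  by_cases h0 : x + 1 = w
  · have h1 : (x + 1) % w = 0 := by rw [h0]; exact Nat.mod_self w
    rw [h1]
    have h2 : 0 + w - 1 = x := by omega
    rw [h2]; exact Nat.mod_eq_of_lt hx
  · have h1 : (x + 1) % w = x + 1 := Nat.mod_eq_of_lt (by omega)
    rw [h1]
    have h2 : x + 1 + w - 1 = x + w := by omega
    rw [h2, Nat.add_mod_right]; exact Nat.mod_eq_of_lt hx

-- ---- a row of g is a member of g ----
theorem pv_getD_mem {g : List (List Char)} {y : Nat} (hy : y < g.length) :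
    g.getD y [] ∈ g := by
  rw [List.getD_eq_getElem _ _ hy]
  exact List.getElem_mem hy

-- ---- pointwise value of A's east pass ----
theorem pv_east_read {g : List (List Char)} {w : Nat}
    (hrow : ∀ r ∈ g, w ≤ r.length) {y j : Nat} (hy : y < g.length) (hj : j < w) :
    pvRead (pvApplyW g (pvEW g g.length w)) y j = pvERow w (g.getD y []) j := by
  have hw : 0 < w := by omega
  have hlen : j < (g.getD y []).length := lt_of_lt_of_le hj (hrow _ (pv_getD_mem hy))
  by_cases hs : pvSrcRow w (g.getD y []) j
  · rw [pvRead_applyW_mem (c := '.') (pvEW g g.length w) g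
      (pv_mem_EW.mpr ⟨j, hy, hj, hs, Or.inl ⟨rfl, rfl⟩⟩) ?_ hy hlen]
    · rw [pvERow, if_pos hs]
    · intro c' hc'
      rcases pv_mem_EW.mp hc' with ⟨x, _, hxw, hsx, hcase⟩
      rcases hcase with ⟨_, hcv⟩ | ⟨hjx, hcv⟩
      · exact hcv
      · exfalso
        simp only [pvSrcRow, Bool.and_eq_true, beq_iff_eq] at hs hsx
        rw [← hjx] at hsx
        rw [hsx.2] at hs
        exact absurd hs.1 (by decide)
  · by_cases ht : pvTgtRow w (g.getD y []) j
    · rw [pvRead_applyW_mem (c := '>') (pvEW g g.length w) g ?_ ?_ hy hlen]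
      · rw [pvERow, if_neg hs, if_pos ht]
      · refine pv_mem_EW.mpr ⟨(j + w - 1) % w, hy, pv_mod_pred_lt hj, ?_,
          Or.inr ⟨(pv_mod_pred_succ hj).symm, rfl⟩⟩
        simp only [pvSrcRow, Bool.and_eq_true, beq_iff_eq]
        simp only [pvTgtRow, Bool.and_eq_true, beq_iff_eq] at ht
        rw [pv_mod_pred_succ hj]
        exact ⟨ht.2, ht.1⟩
      · intro c' hc'
        rcases pv_mem_EW.mp hc' with ⟨x, _, hxw, hsx, hcase⟩
        rcases hcase with ⟨hjx, hcv⟩ | ⟨_, hcv⟩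
        · exfalso
          simp only [pvSrcRow, Bool.and_eq_true, beq_iff_eq] at hsx
          simp only [pvTgtRow, Bool.and_eq_true, beq_iff_eq] at ht
          rw [← hjx] at hsx
          rw [hsx.1] at ht
          exact absurd ht.1 (by decide)
        · exact hcv
    · rw [pvRead_applyW_not_mem (pvEW g g.length w) g ?_]
      · rw [pvERow, if_neg hs, if_neg ht]
        rfl
      · intro c hc
        rcases pv_mem_EW.mp hc with ⟨x, _, hxw, hsx, hcase⟩
        rcases hcase with ⟨hjx, _⟩ | ⟨hjx, _⟩
        · rw [← hjx] at hsx
          exact hs hsx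
        · apply ht
          simp only [pvSrcRow, Bool.and_eq_true, beq_iff_eq] at hsx
          simp only [pvTgtRow, Bool.and_eq_true, beq_iff_eq]
          have hxeq : (j + w - 1) % w = x := by
            rw [hjx, pv_mod_succ_pred hxw]
          rw [hxeq, ← hjx] at *
          exact ⟨hsx.2, hsx.1⟩

-- ---- pointwise value of A's south pass ----
theorem pv_south_read {g : List (List Char)} {w : Nat}
    (hrow : ∀ r ∈ g, w ≤ r.length) {z j : Nat} (hz : z < g.length) (hj : j < w) :
    pvRead (pvApplyW g (pvSW g g.length w)) z j = pvSRule g g.length z j := by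
  have hh : 0 < g.length := by omega
  have hlen : j < (g.getD z []).length := lt_of_lt_of_le hj (hrow _ (pv_getD_mem hz))
  by_cases hs : pvSrcS g g.length z j
  · rw [pvRead_applyW_mem (c := '.') (pvSW g g.length w) g
      (pv_mem_SW.mpr ⟨z, j, hz, hj, hs, Or.inl ⟨rfl, rfl, rfl⟩⟩) ?_ hz hlen]
    · rw [pvSRule, if_pos hs]
    · intro c' hc'
      rcases pv_mem_SW.mp hc' with ⟨y, x, hyh, hxw, hsx, hcase⟩
      rcases hcase with ⟨_, _, hcv⟩ | ⟨hzy, hjx, hcv⟩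
      · exact hcv
      · exfalso
        simp only [pvSrcS, Bool.and_eq_true, beq_iff_eq] at hs hsx
        rw [← hzy, ← hjx] at hsx
        rw [hsx.2] at hs
        exact absurd hs.1 (by decide)
  · by_cases ht : pvTgtS g g.length z j
    · rw [pvRead_applyW_mem (c := 'v') (pvSW g g.length w) g ?_ ?_ hz hlen]
      · rw [pvSRule, if_neg hs, if_pos ht]
      · refine pv_mem_SW.mpr ⟨(z + g.length - 1) % g.length, j, pv_mod_pred_lt hz, hj, ?_,
          Or.inr ⟨(pv_mod_pred_succ hz).symm, rfl, rfl⟩⟩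
        simp only [pvSrcS, Bool.and_eq_true, beq_iff_eq]
        simp only [pvTgtS, Bool.and_eq_true, beq_iff_eq] at ht
        rw [pv_mod_pred_succ hz]
        exact ⟨ht.2, ht.1⟩
      · intro c' hc'
        rcases pv_mem_SW.mp hc' with ⟨y, x, hyh, hxw, hsx, hcase⟩
        rcases hcase with ⟨hzy, hjx, hcv⟩ | ⟨_, _, hcv⟩
        · exfalso
          simp only [pvSrcS, Bool.and_eq_true, beq_iff_eq] at hsx
          simp only [pvTgtS, Bool.and_eq_true, beq_iff_eq] at ht
          rw [← hzy, ← hjx] at hsx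
          rw [hsx.1] at ht
          exact absurd ht.1 (by decide)
        · exact hcv
    · rw [pvRead_applyW_not_mem (pvSW g g.length w) g ?_]
      · rw [pvSRule, if_neg hs, if_neg ht]
      · intro c hc
        rcases pv_mem_SW.mp hc with ⟨y, x, hyh, hxw, hsx, hcase⟩
        rcases hcase with ⟨hzy, hjx, _⟩ | ⟨hzy, hjx, _⟩
        · rw [← hzy, ← hjx] at hsx
          exact hs hsx
        · apply ht
          simp only [pvSrcS, Bool.and_eq_true, beq_iff_eq] at hsx
          simp only [pvTgtS, Bool.and_eq_true, beq_iff_eq]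
          have hyeq : (z + g.length - 1) % g.length = y := by
            rw [hzy]; exact pv_mod_succ_pred hyh
          exact ⟨by rw [hzy, hjx]; exact hsx.2, by rw [hyeq, hjx]; exact hsx.1⟩

-- ---- loop shapes of A's passes ----
theorem pv_loop_split {i : Type} (C : i → Bool) (W : List (List Char) → i → List (List Char)) :
    ∀ (L : List i) (p : List (List Char) × Bool),
      L.foldl (fun acc z => if C z then (W acc.1 z, true) else acc) p
      = (L.foldl (fun a z => if C z then W a z else a) p.1, p.2 || L.any C) := by
  intro L
  induction L with
  | nil => intro p; simp
  | cons z t ih =>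
    intro p
    simp only [List.foldl_cons, List.any_cons]
    by_cases h : C z
    · rw [if_pos h, if_pos h, ih]; simp [h]
    · rw [if_neg h, if_neg h, ih]; simp [h]

theorem pv_loop_outer_split {i : Type} (G : List (List Char) → i → List (List Char)) (q : i → Bool) :
    ∀ (L : List i) (p : List (List Char) × Bool),
      L.foldl (fun acc z => (G acc.1 z, acc.2 || q z)) p = (L.foldl G p.1, p.2 || L.any q) := by
  intro L
  induction L with
  | nil => intro p; simp
  | cons z t ih =>
    intro p
    simp only [List.foldl_cons, List.any_cons, ih]
    simp [Bool.or_assoc]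

-- ---- the east pass of port A as a write list ----
theorem pv_eastA_eq (h w : Nat) (g : List (List Char)) :
    pvEastA h w g =
      (pvApplyW g (pvEW g h w),
       (List.range h).any (fun y => (List.range w).any (fun x => pvSrcRow w (g.getD y []) x))) := by
  unfold pvEastA
  have hinner : ∀ (y : Nat) (p : List (List Char) × Bool),
      (List.range w).foldl (fun acc x =>
        if pvRead g y x == '>' && pvRead g y ((x + 1) % w) == '.' then
          (pvWrite (pvWrite acc.1 y x '.') y ((x + 1) % w) '>', true)
        else acc) p
      = (pvApplyW p.1 ((List.range w).flatMap (fun x =>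
            if pvSrcRow w (g.getD y []) x then [((y, x), '.'), ((y, (x + 1) % w), '>')] else [])),
         p.2 || (List.range w).any (fun x => pvSrcRow w (g.getD y []) x)) := by
    intro y p
    rw [pv_loop_split (fun x => pvRead g y x == '>' && pvRead g y ((x + 1) % w) == '.')
        (fun a x => pvWrite (pvWrite a y x '.') y ((x + 1) % w) '>')]
    have hbody : (fun (a : List (List Char)) (x : Nat) =>
        if pvRead g y x == '>' && pvRead g y ((x + 1) % w) == '.' then
          pvWrite (pvWrite a y x '.') y ((x + 1) % w) '>' else a)
        = (fun a x => pvApplyW a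
            (if pvSrcRow w (g.getD y []) x then [((y, x), '.'), ((y, (x + 1) % w), '>')] else [])) := by
      funext a x
      show (if pvSrcRow w (g.getD y []) x = true then
          pvWrite (pvWrite a y x '.') y ((x + 1) % w) '>' else a)
        = pvApplyW a (if pvSrcRow w (g.getD y []) x = true
            then [((y, x), '.'), ((y, (x + 1) % w), '>')] else [])
      by_cases hc : pvSrcRow w (g.getD y []) x = true
      · rw [if_pos hc, if_pos hc]
        rfl
      · rw [if_neg hc, if_neg hc]
        rfl
    rw [hbody, pv_foldl_applyW]
    rfl

  simp only [hinner]
  rw [pv_loop_outer_split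
      (fun a y => pvApplyW a ((List.range w).flatMap (fun x =>
        if pvSrcRow w (g.getD y []) x then [((y, x), '.'), ((y, (x + 1) % w), '>')] else [])))
      (fun y => (List.range w).any (fun x => pvSrcRow w (g.getD y []) x))]
  rw [pv_foldl_applyW]
  rfl

-- ---- the south pass of port A as a write list ----
theorem pv_southA_eq (h w : Nat) (g : List (List Char)) (m0 : Bool) :
    pvSouthA h w g m0 =
      (pvApplyW g (pvSW g h w),
       m0 || (List.range h).any (fun y => (List.range w).any (fun x => pvSrcS g h y x))) := by
  unfold pvSouthA
  have hinner : ∀ (y : Nat) (p : List (List Char) × Bool),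
      (List.range w).foldl (fun acc x =>
        if pvRead g y x == 'v' && pvRead g ((y + 1) % h) x == '.' then
          (pvWrite (pvWrite acc.1 y x '.') ((y + 1) % h) x 'v', true)
        else acc) p
      = (pvApplyW p.1 ((List.range w).flatMap (fun x =>
            if pvSrcS g h y x then [((y, x), '.'), (((y + 1) % h, x), 'v')] else [])),
         p.2 || (List.range w).any (fun x => pvSrcS g h y x)) := by
    intro y p
    rw [pv_loop_split (fun x => pvRead g y x == 'v' && pvRead g ((y + 1) % h) x == '.')
        (fun a x => pvWrite (pvWrite a y x '.') ((y + 1) % h) x 'v')]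
    have hbody : (fun (a : List (List Char)) (x : Nat) =>
        if pvRead g y x == 'v' && pvRead g ((y + 1) % h) x == '.' then
          pvWrite (pvWrite a y x '.') ((y + 1) % h) x 'v' else a)
        = (fun a x => pvApplyW a
            (if pvSrcS g h y x then [((y, x), '.'), (((y + 1) % h, x), 'v')] else [])) := by
      funext a x
      show (if pvSrcS g h y x = true then
          pvWrite (pvWrite a y x '.') ((y + 1) % h) x 'v' else a)
        = pvApplyW a (if pvSrcS g h y x = true
            then [((y, x), '.'), (((y + 1) % h, x), 'v')] else [])
      by_cases hc : pvSrcS g h y x = true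
      · rw [if_pos hc, if_pos hc]
        rfl
      · rw [if_neg hc, if_neg hc]
        rfl
    rw [hbody, pv_foldl_applyW]
    rfl

  simp only [hinner]
  rw [pv_loop_outer_split
      (fun a y => pvApplyW a ((List.range w).flatMap (fun x =>
        if pvSrcS g h y x then [((y, x), '.'), (((y + 1) % h, x), 'v')] else [])))
      (fun y => (List.range w).any (fun x => pvSrcS g h y x))]
  rw [pv_foldl_applyW]
  rfl

theorem pv_rows_ge {g g' : List (List Char)} {w : Nat}
    (hlen : g'.length = g.length)
    (hrowlen : ∀ z, ((g'.getD z []).length = (g.getD z []).length))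
    (hg : ∀ r ∈ g, w ≤ r.length) : ∀ r ∈ g', w ≤ r.length := by
  intro r hr
  obtain ⟨i, hi, rfl⟩ := List.mem_iff_getElem.mp hr
  have h1 : g'[i] = g'.getD i [] := (List.getD_eq_getElem _ _ hi).symm
  have hig : i < g.length := by omega
  rw [h1, hrowlen i, List.getD_eq_getElem _ _ hig]
  exact hg _ (List.getElem_mem hig)

-- ---- generic membership through a fold whose step has a membership rule ----
theorem pv_mem_foldl_of_step {α β : Type} (st : List α → β → List α) (R : β → α → Prop)
    (hst : ∀ s b q, q ∈ st s b ↔ q ∈ s ∨ R b q) :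
    ∀ (L : List β) (s : List α) (q : α),
      q ∈ L.foldl st s ↔ q ∈ s ∨ ∃ b ∈ L, R b q := by
  intro L
  induction L with
  | nil => intro s q; simp
  | cons b t ih =>
    intro s q
    rw [List.foldl_cons, ih, hst]
    constructor
    · rintro (⟨h | h⟩ | ⟨b', hb', h⟩)
      · exact Or.inl h
      · exact Or.inr ⟨b, List.mem_cons_self, h⟩
      · exact Or.inr ⟨b', List.mem_cons_of_mem _ hb', h⟩
    · rintro (h | ⟨b', hb', h⟩)
      · exact Or.inl (Or.inl h)
      · rcases List.mem_cons.mp hb' with rfl | hb'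
        · exact Or.inl (Or.inr h)
        · exact Or.inr ⟨b', hb', h⟩

-- ---- projections of the triple-state parsing fold ----
theorem pv_foldl_proj1 {A B C β : Type} (st : (A × B × C) → β → (A × B × C)) (u : A → β → A)
    (hc : ∀ acc b, (st acc b).1 = u acc.1 b) :
    ∀ (L : List β) (acc : A × B × C), (L.foldl st acc).1 = L.foldl u acc.1 := by
  intro L
  induction L with
  | nil => intro acc; rfl
  | cons b t ih => intro acc; rw [List.foldl_cons, List.foldl_cons, ih, hc]

theorem pv_foldl_proj2 {A B C β : Type} (st : (A × B × C) → β → (A × B × C)) (u : B → β → B)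
    (hc : ∀ acc b, (st acc b).2.1 = u acc.2.1 b) :
    ∀ (L : List β) (acc : A × B × C), (L.foldl st acc).2.1 = L.foldl u acc.2.1 := by
  intro L
  induction L with
  | nil => intro acc; rfl
  | cons b t ih => intro acc; rw [List.foldl_cons, List.foldl_cons, ih, hc]

theorem pv_foldl_proj3 {A B C β : Type} (st : (A × B × C) → β → (A × B × C)) (u : C → β → C)
    (hc : ∀ acc b, (st acc b).2.2 = u acc.2.2 b) :
    ∀ (L : List β) (acc : A × B × C), (L.foldl st acc).2.2 = L.foldl u acc.2.2 := by
  intro L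
  induction L with
  | nil => intro acc; rfl
  | cons b t ih => intro acc; rw [List.foldl_cons, List.foldl_cons, ih, hc]

-- ---- the invariant: the grid of port A versus the coordinate sets of port B ----
def pvInv (h w : Nat) (g : List (List Char)) (E S W : List (Nat × Nat)) : Prop :=
  g.length = h ∧ (∀ r ∈ g, w ≤ r.length) ∧
  (∀ p : Nat × Nat, p ∈ E ↔ p.1 < h ∧ p.2 < w ∧ pvRead g p.1 p.2 = '>') ∧
  (∀ p : Nat × Nat, p ∈ S ↔ p.1 < h ∧ p.2 < w ∧ pvRead g p.1 p.2 = 'v') ∧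
  (∀ p : Nat × Nat, p ∈ W ↔ p.1 < h ∧ p.2 < w ∧
      pvRead g p.1 p.2 ≠ '.' ∧ pvRead g p.1 p.2 ≠ '>' ∧ pvRead g p.1 p.2 ≠ 'v')

-- occupancy: `t in east | south | walls` means the cell's char is not '.'
theorem pv_occ_iff {h w : Nat} {g : List (List Char)} {E S W : List (Nat × Nat)}
    (hE : ∀ p : Nat × Nat, p ∈ E ↔ p.1 < h ∧ p.2 < w ∧ pvRead g p.1 p.2 = '>')
    (hS : ∀ p : Nat × Nat, p ∈ S ↔ p.1 < h ∧ p.2 < w ∧ pvRead g p.1 p.2 = 'v')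
    (hW : ∀ p : Nat × Nat, p ∈ W ↔ p.1 < h ∧ p.2 < w ∧
        pvRead g p.1 p.2 ≠ '.' ∧ pvRead g p.1 p.2 ≠ '>' ∧ pvRead g p.1 p.2 ≠ 'v')
    (q : Nat × Nat) :
    PySem.Set.contains (PySem.Set.union (PySem.Set.union E S) W) q = true ↔
      q.1 < h ∧ q.2 < w ∧ pvRead g q.1 q.2 ≠ '.' := by
  rw [PySem.Set.contains_iff, PySem.Set.mem_union, PySem.Set.mem_union, hE q, hS q, hW q]
  constructor
  · rintro ((⟨h1, h2, h3⟩ | ⟨h1, h2, h3⟩) | ⟨h1, h2, h3, _, _⟩)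
    · exact ⟨h1, h2, by rw [h3]; decide⟩
    · exact ⟨h1, h2, by rw [h3]; decide⟩
    · exact ⟨h1, h2, h3⟩
  · rintro ⟨h1, h2, h3⟩
    by_cases he : pvRead g q.1 q.2 = '>'
    · exact Or.inl (Or.inl ⟨h1, h2, he⟩)
    · by_cases hv : pvRead g q.1 q.2 = 'v'
      · exact Or.inl (Or.inr ⟨h1, h2, hv⟩)
      · exact Or.inr ⟨h1, h2, h3, he, hv⟩

-- the phase fold, split into the produced set and the moved flag
theorem pv_phase_eq (cucs occ : List (Nat × Nat)) (mv : Nat × Nat → Nat × Nat) :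
    pvPhase cucs occ mv =
      (cucs.foldl (fun s p =>
          PySem.Set.add s (if PySem.Set.contains occ (mv p) then p else mv p)) [],
       cucs.any (fun p => !PySem.Set.contains occ (mv p))) := by
  unfold pvPhase
  have hgen : ∀ (L : List (Nat × Nat)) (acc : List (Nat × Nat) × Bool),
      L.foldl (fun acc p =>
        let t := mv p
        if PySem.Set.contains occ t then (PySem.Set.add acc.1 p, acc.2)
        else (PySem.Set.add acc.1 t, true)) acc
      = (L.foldl (fun s p =>
            PySem.Set.add s (if PySem.Set.contains occ (mv p) then p else mv p)) acc.1,
         acc.2 || L.any (fun p => !PySem.Set.contains occ (mv p))) := by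
    intro L
    induction L with
    | nil => intro acc; simp
    | cons p t ih =>
      intro acc
      simp only [List.foldl_cons, List.any_cons]
      by_cases hc : PySem.Set.contains occ (mv p) = true
      · rw [if_pos hc, ih, if_pos hc]
        have hm : mv p ∈ occ := (PySem.Set.contains_iff occ (mv p)).mp hc
        simp [hm]
      · rw [if_neg hc, ih, if_neg hc]
        have hm : mv p ∉ occ := fun hmem => hc ((PySem.Set.contains_iff occ (mv p)).mpr hmem)
        simp [hm]
  rw [hgen]
  rfl

-- membership in the set a phase produces
theorem pv_mem_phase (cucs occ : List (Nat × Nat)) (mv : Nat × Nat → Nat × Nat)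
    (q : Nat × Nat) :
    q ∈ (pvPhase cucs occ mv).1 ↔
      ∃ p ∈ cucs, q = (if PySem.Set.contains occ (mv p) then p else mv p) := by
  rw [pv_phase_eq]
  have := PySem.Set.mem_foldl_add
    (f := fun p : Nat × Nat => if PySem.Set.contains occ (mv p) then p else mv p)
    (l := cucs) (s := ([] : List (Nat × Nat))) (y := q)
  rw [this]
  simp

-- ---- character shapes of the per-cell rules ----
theorem pv_src_char {w : Nat} {r : List Char} {x : Nat} (h : pvSrcRow w r x = true) :
    r.getD x ' ' = '>' ∧ r.getD ((x + 1) % w) ' ' = '.' := by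
  simpa [pvSrcRow] using h

theorem pv_tgt_char {w : Nat} {r : List Char} {x : Nat} (h : pvTgtRow w r x = true) :
    r.getD x ' ' = '.' ∧ r.getD ((x + w - 1) % w) ' ' = '>' := by
  simpa [pvTgtRow] using h

theorem pv_eRow_gt {w : Nat} {r : List Char} {j : Nat} :
    pvERow w r j = '>' ↔
      (pvTgtRow w r j = true ∨ (r.getD j ' ' = '>' ∧ pvSrcRow w r j = false)) := by
  unfold pvERow
  by_cases hs : pvSrcRow w r j = true
  · rw [if_pos hs]
    have h1 := (pv_src_char hs).1
    constructor
    · intro h; exact absurd h (by decide)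
    · rintro (ht | ⟨_, hns⟩)
      · exact absurd (pv_tgt_char ht).1 (by rw [h1]; decide)
      · exact absurd hs (by rw [hns]; decide)
  · rw [if_neg hs]
    by_cases ht : pvTgtRow w r j = true
    · rw [if_pos ht]
      exact ⟨fun _ => Or.inl ht, fun _ => rfl⟩
    · rw [if_neg ht]
      constructor
      · intro h; exact Or.inr ⟨h, Bool.eq_false_iff.mpr hs⟩
      · rintro (h | ⟨h, _⟩)
        · exact absurd h ht
        · exact h

theorem pv_eRow_v {w : Nat} {r : List Char} {j : Nat} :
    pvERow w r j = 'v' ↔ r.getD j ' ' = 'v' := by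
  unfold pvERow
  by_cases hs : pvSrcRow w r j = true
  · rw [if_pos hs]
    have h1 := (pv_src_char hs).1
    constructor
    · intro h; exact absurd h (by decide)
    · intro h; exact absurd h1 (by rw [h]; decide)
  · rw [if_neg hs]
    by_cases ht : pvTgtRow w r j = true
    · rw [if_pos ht]
      have h1 := (pv_tgt_char ht).1
      constructor
      · intro h; exact absurd h (by decide)
      · intro h; exact absurd h1 (by rw [h]; decide)
    · rw [if_neg ht]

theorem pv_eRow_wall {w : Nat} {r : List Char} {j : Nat} :
    (pvERow w r j ≠ '.' ∧ pvERow w r j ≠ '>' ∧ pvERow w r j ≠ 'v') ↔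
      (r.getD j ' ' ≠ '.' ∧ r.getD j ' ' ≠ '>' ∧ r.getD j ' ' ≠ 'v') := by
  unfold pvERow
  by_cases hs : pvSrcRow w r j = true
  · rw [if_pos hs]
    have h1 := (pv_src_char hs).1
    constructor
    · rintro ⟨h, _⟩; exact absurd rfl h
    · rintro ⟨_, h, _⟩; exact absurd h1 h
  · rw [if_neg hs]
    by_cases ht : pvTgtRow w r j = true
    · rw [if_pos ht]
      have h1 := (pv_tgt_char ht).1
      constructor
      · rintro ⟨_, h, _⟩; exact absurd rfl h
      · rintro ⟨h, _⟩; exact absurd h1 h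
    · rw [if_neg ht]

theorem pv_srcS_char {g : List (List Char)} {h y x : Nat} (hs : pvSrcS g h y x = true) :
    pvRead g y x = 'v' ∧ pvRead g ((y + 1) % h) x = '.' := by
  simpa [pvSrcS] using hs

theorem pv_tgtS_char {g : List (List Char)} {h y x : Nat} (ht : pvTgtS g h y x = true) :
    pvRead g y x = '.' ∧ pvRead g ((y + h - 1) % h) x = 'v' := by
  simpa [pvTgtS] using ht

theorem pv_sRule_v {g : List (List Char)} {h y x : Nat} :
    pvSRule g h y x = 'v' ↔
      (pvTgtS g h y x = true ∨ (pvRead g y x = 'v' ∧ pvSrcS g h y x = false)) := by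
  unfold pvSRule
  by_cases hs : pvSrcS g h y x = true
  · rw [if_pos hs]
    have h1 := (pv_srcS_char hs).1
    constructor
    · intro hh; exact absurd hh (by decide)
    · rintro (ht | ⟨_, hns⟩)
      · exact absurd (pv_tgtS_char ht).1 (by rw [h1]; decide)
      · exact absurd hs (by rw [hns]; decide)
  · rw [if_neg hs]
    by_cases ht : pvTgtS g h y x = true
    · rw [if_pos ht]
      exact ⟨fun _ => Or.inl ht, fun _ => rfl⟩
    · rw [if_neg ht]
      constructor
      · intro hh; exact Or.inr ⟨hh, Bool.eq_false_iff.mpr hs⟩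
      · rintro (hh | ⟨hh, _⟩)
        · exact absurd hh ht
        · exact hh

theorem pv_sRule_gt {g : List (List Char)} {h y x : Nat} :
    pvSRule g h y x = '>' ↔ pvRead g y x = '>' := by
  unfold pvSRule
  by_cases hs : pvSrcS g h y x = true
  · rw [if_pos hs]
    have h1 := (pv_srcS_char hs).1
    constructor
    · intro hh; exact absurd hh (by decide)
    · intro hh; exact absurd h1 (by rw [hh]; decide)
  · rw [if_neg hs]
    by_cases ht : pvTgtS g h y x = true
    · rw [if_pos ht]
      have h1 := (pv_tgtS_char ht).1
      constructor
      · intro hh; exact absurd hh (by decide)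
      · intro hh; exact absurd h1 (by rw [hh]; decide)
    · rw [if_neg ht]

theorem pv_sRule_wall {g : List (List Char)} {h y x : Nat} :
    (pvSRule g h y x ≠ '.' ∧ pvSRule g h y x ≠ '>' ∧ pvSRule g h y x ≠ 'v') ↔
      (pvRead g y x ≠ '.' ∧ pvRead g y x ≠ '>' ∧ pvRead g y x ≠ 'v') := by
  unfold pvSRule
  by_cases hs : pvSrcS g h y x = true
  · rw [if_pos hs]
    have h1 := (pv_srcS_char hs).1
    constructor
    · rintro ⟨hh, _⟩; exact absurd rfl hh
    · rintro ⟨_, _, hh⟩; exact absurd h1 hh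
  · rw [if_neg hs]
    by_cases ht : pvTgtS g h y x = true
    · rw [if_pos ht]
      have h1 := (pv_tgtS_char ht).1
      constructor
      · rintro ⟨_, _, hh⟩; exact absurd rfl hh
      · rintro ⟨hh, _⟩; exact absurd h1 hh
    · rw [if_neg ht]

-- ---- the east phase preserves the invariant and the flags agree ----
theorem pv_inv_east {h w : Nat} {g : List (List Char)} {E S W : List (Nat × Nat)}
    (hinv : pvInv h w g E S W) :
    pvInv h w (pvEastA h w g).1
      (pvPhase E (PySem.Set.union (PySem.Set.union E S) W) (fun p => (p.1, (p.2 + 1) % w))).1 S W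
    ∧ (pvEastA h w g).2
      = (pvPhase E (PySem.Set.union (PySem.Set.union E S) W) (fun p => (p.1, (p.2 + 1) % w))).2 := by
  obtain ⟨hlen, hrow, hE, hS, hW⟩ := hinv
  subst hlen
  have hocc := pv_occ_iff (h := g.length) (w := w) (g := g) hE hS hW
  have hread : ∀ {y j : Nat}, y < g.length → j < w →
      pvRead (pvEastA g.length w g).1 y j = pvERow w (g.getD y []) j := by
    intro y j hy hj
    rw [pv_eastA_eq]
    exact pv_east_read hrow hy hj
  have hlen' : (pvEastA g.length w g).1.length = g.length := by
    rw [pv_eastA_eq]; exact pv_applyW_length _ _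
  have hrow' : ∀ r ∈ (pvEastA g.length w g).1, w ≤ r.length := by
    rw [pv_eastA_eq]
    exact pv_rows_ge (pv_applyW_length _ _) (fun z => pv_applyW_rowlen _ _ z) hrow
  -- the free test of a cucumber p ∈ E is exactly pvSrcRow at p
  have hfree : ∀ p : Nat × Nat, p ∈ E →
      ((PySem.Set.contains (PySem.Set.union (PySem.Set.union E S) W) (p.1, (p.2 + 1) % w))
        = false ↔ pvSrcRow w (g.getD p.1 []) p.2 = true) := by
    intro p hp
    obtain ⟨hy, hx, hc⟩ := (hE p).mp hp
    have hw : 0 < w := by omega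
    constructor
    · intro hcf
      have : ¬ ((p.1, (p.2 + 1) % w).1 < g.length ∧ (p.1, (p.2 + 1) % w).2 < w ∧
          pvRead g p.1 ((p.2 + 1) % w) ≠ '.') := by
        intro hcon
        have := (hocc _).mpr hcon
        rw [hcf] at this; exact absurd this (by decide)
      simp only [hy, Nat.mod_lt _ hw, true_and, not_not] at this
      simp only [pvSrcRow, Bool.and_eq_true, beq_iff_eq]
      exact ⟨hc, this⟩
    · intro hsrc
      have h2 := (pv_src_char hsrc).2
      by_cases hcf : PySem.Set.contains (PySem.Set.union (PySem.Set.union E S) W)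
          (p.1, (p.2 + 1) % w) = true
      · obtain ⟨_, _, hne⟩ := (hocc _).mp hcf
        exact absurd h2 hne
      · exact Bool.eq_false_iff.mpr hcf
  refine ⟨⟨hlen', hrow', ?_, ?_, ?_⟩, ?_⟩
  · -- east set after the phase
    intro p
    rw [pv_mem_phase]
    constructor
    · rintro ⟨p0, hp0, rfl⟩
      obtain ⟨hy, hx, hc⟩ := (hE p0).mp hp0
      by_cases hcf : PySem.Set.contains (PySem.Set.union (PySem.Set.union E S) W)
          (p0.1, (p0.2 + 1) % w) = true
      · rw [if_pos hcf]
        have hns : pvSrcRow w (g.getD p0.1 []) p0.2 = false := by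
          by_cases hsr : pvSrcRow w (g.getD p0.1 []) p0.2 = true
          · have := (hfree p0 hp0).mpr hsr
            rw [hcf] at this; exact absurd this (by decide)
          · exact Bool.eq_false_iff.mpr hsr
        refine ⟨hy, hx, ?_⟩
        rw [hread hy hx, pv_eRow_gt]
        exact Or.inr ⟨hc, hns⟩
      · rw [if_neg hcf]
        have hsrc := (hfree p0 hp0).mp (Bool.eq_false_iff.mpr hcf)
        have hw : 0 < w := by omega
        have hx' : (p0.2 + 1) % w < w := Nat.mod_lt _ hw
        refine ⟨hy, hx', ?_⟩
        show pvRead (pvEastA g.length w g).1 p0.1 ((p0.2 + 1) % w) = '>'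
        rw [hread hy hx', pv_eRow_gt]
        refine Or.inl ?_
        simp only [pvTgtRow, Bool.and_eq_true, beq_iff_eq]
        rw [pv_mod_succ_pred hx]
        exact ⟨(pv_src_char hsrc).2, hc⟩
    · rintro ⟨hy, hx, hc⟩
      rw [hread hy hx, pv_eRow_gt] at hc
      rcases hc with ht | ⟨hold, hns⟩
      · -- the cucumber to the left moved here
        obtain ⟨hdot, hgt⟩ := pv_tgt_char ht
        have hxl : (p.2 + w - 1) % w < w := pv_mod_pred_lt hx
        have hp0 : (p.1, (p.2 + w - 1) % w) ∈ E := (hE _).mpr ⟨hy, hxl, hgt⟩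
        refine ⟨(p.1, (p.2 + w - 1) % w), hp0, ?_⟩
        have hsrc : pvSrcRow w (g.getD p.1 []) ((p.2 + w - 1) % w) = true := by
          simp only [pvSrcRow, Bool.and_eq_true, beq_iff_eq]
          rw [pv_mod_pred_succ hx]
          exact ⟨hgt, hdot⟩
        have hcf := (hfree _ hp0).mpr hsrc
        rw [if_neg (by rw [hcf]; exact Bool.false_ne_true)]
        have : ((p.2 + w - 1) % w + 1) % w = p.2 := pv_mod_pred_succ hx
        ext <;> simp [this]
      · -- it stayed put
        have hp0 : p ∈ E := (hE p).mpr ⟨hy, hx, hold⟩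
        refine ⟨p, hp0, ?_⟩
        have hcf : PySem.Set.contains (PySem.Set.union (PySem.Set.union E S) W)
            (p.1, (p.2 + 1) % w) = true := by
          by_cases hcf : PySem.Set.contains (PySem.Set.union (PySem.Set.union E S) W)
              (p.1, (p.2 + 1) % w) = true
          · exact hcf
          · have := (hfree p hp0).mp (Bool.eq_false_iff.mpr hcf)
            rw [this] at hns; exact absurd hns (by decide)
        rw [if_pos hcf]
  · -- south set unchanged by the east pass
    intro p
    rw [hS p]
    constructor
    · rintro ⟨hy, hx, hc⟩
      exact ⟨hy, hx, by rw [hread hy hx, pv_eRow_v]; exact hc⟩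
    · rintro ⟨hy, hx, hc⟩
      rw [hread hy hx, pv_eRow_v] at hc
      exact ⟨hy, hx, hc⟩
  · -- wall set unchanged
    intro p
    rw [hW p]
    constructor
    · rintro ⟨hy, hx, hc⟩
      refine ⟨hy, hx, ?_⟩
      rw [hread hy hx]
      exact pv_eRow_wall.mpr hc
    · rintro ⟨hy, hx, hc⟩
      rw [hread hy hx] at hc
      exact ⟨hy, hx, pv_eRow_wall.mp hc⟩
  · -- flags
    rw [pv_eastA_eq, pv_phase_eq]
    simp only
    rw [Bool.eq_iff_iff, List.any_eq_true, List.any_eq_true]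
    constructor
    · rintro ⟨y, hy, hin⟩
      rw [List.any_eq_true] at hin
      obtain ⟨x, hx, hsrc⟩ := hin
      rw [List.mem_range] at hy hx
      have hchar := (pv_src_char hsrc).1
      have hp : ((y, x) : Nat × Nat) ∈ E := (hE _).mpr ⟨hy, hx, hchar⟩
      exact ⟨(y, x), hp, by rw [(hfree _ hp).mpr hsrc]; rfl⟩
    · rintro ⟨p, hp, hb⟩
      have hcf : PySem.Set.contains (PySem.Set.union (PySem.Set.union E S) W)
          (p.1, (p.2 + 1) % w) = false := by
        cases hx : PySem.Set.contains (PySem.Set.union (PySem.Set.union E S) W)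
            (p.1, (p.2 + 1) % w) with
        | false => rfl
        | true => rw [hx] at hb; exact absurd hb (by decide)
      have hsrc := (hfree p hp).mp hcf
      obtain ⟨hy, hx, _⟩ := (hE p).mp hp
      exact ⟨p.1, List.mem_range.mpr hy,
        List.any_eq_true.mpr ⟨p.2, List.mem_range.mpr hx, hsrc⟩⟩

-- ---- the south phase preserves the invariant and the flags agree ----
theorem pv_inv_south {h w : Nat} {g : List (List Char)} {E S W : List (Nat × Nat)}
    (hinv : pvInv h w g E S W) (m0 : Bool) :
    pvInv h w (pvSouthA h w g m0).1 E
      (pvPhase S (PySem.Set.union (PySem.Set.union E S) W) (fun p => ((p.1 + 1) % h, p.2))).1 W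
    ∧ (pvSouthA h w g m0).2
      = (m0 || (pvPhase S (PySem.Set.union (PySem.Set.union E S) W)
                (fun p => ((p.1 + 1) % h, p.2))).2) := by
  obtain ⟨hlen, hrow, hE, hS, hW⟩ := hinv
  subst hlen
  have hocc := pv_occ_iff (h := g.length) (w := w) (g := g) hE hS hW
  have hread : ∀ {y j : Nat}, y < g.length → j < w →
      pvRead (pvSouthA g.length w g m0).1 y j = pvSRule g g.length y j := by
    intro y j hy hj
    rw [pv_southA_eq]
    exact pv_south_read hrow hy hj
  have hlen' : (pvSouthA g.length w g m0).1.length = g.length := by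
    rw [pv_southA_eq]; exact pv_applyW_length _ _
  have hrow' : ∀ r ∈ (pvSouthA g.length w g m0).1, w ≤ r.length := by
    rw [pv_southA_eq]
    exact pv_rows_ge (pv_applyW_length _ _) (fun z => pv_applyW_rowlen _ _ z) hrow
  have hfree : ∀ p : Nat × Nat, p ∈ S →
      ((PySem.Set.contains (PySem.Set.union (PySem.Set.union E S) W) ((p.1 + 1) % g.length, p.2))
        = false ↔ pvSrcS g g.length p.1 p.2 = true) := by
    intro p hp
    obtain ⟨hy, hx, hc⟩ := (hS p).mp hp
    have hh : 0 < g.length := by omega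
    constructor
    · intro hcf
      have : ¬ (((p.1 + 1) % g.length, p.2).1 < g.length ∧ ((p.1 + 1) % g.length, p.2).2 < w ∧
          pvRead g ((p.1 + 1) % g.length) p.2 ≠ '.') := by
        intro hcon
        have := (hocc _).mpr hcon
        rw [hcf] at this; exact absurd this (by decide)
      simp only [Nat.mod_lt _ hh, hx, true_and, not_not] at this
      simp only [pvSrcS, Bool.and_eq_true, beq_iff_eq]
      exact ⟨hc, this⟩
    · intro hsrc
      have h2 := (pv_srcS_char hsrc).2
      by_cases hcf : PySem.Set.contains (PySem.Set.union (PySem.Set.union E S) W)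
          ((p.1 + 1) % g.length, p.2) = true
      · obtain ⟨_, _, hne⟩ := (hocc _).mp hcf
        exact absurd h2 hne
      · exact Bool.eq_false_iff.mpr hcf
  refine ⟨⟨hlen', hrow', ?_, ?_, ?_⟩, ?_⟩
  · -- east set unchanged by the south pass
    intro p
    rw [hE p]
    constructor
    · rintro ⟨hy, hx, hc⟩
      exact ⟨hy, hx, by rw [hread hy hx, pv_sRule_gt]; exact hc⟩
    · rintro ⟨hy, hx, hc⟩
      rw [hread hy hx, pv_sRule_gt] at hc
      exact ⟨hy, hx, hc⟩
  · -- south set after the phase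
    intro p
    rw [pv_mem_phase]
    constructor
    · rintro ⟨p0, hp0, rfl⟩
      obtain ⟨hy, hx, hc⟩ := (hS p0).mp hp0
      by_cases hcf : PySem.Set.contains (PySem.Set.union (PySem.Set.union E S) W)
          ((p0.1 + 1) % g.length, p0.2) = true
      · rw [if_pos hcf]
        have hns : pvSrcS g g.length p0.1 p0.2 = false := by
          by_cases hsr : pvSrcS g g.length p0.1 p0.2 = true
          · have := (hfree p0 hp0).mpr hsr
            rw [hcf] at this; exact absurd this (by decide)
          · exact Bool.eq_false_iff.mpr hsr
        refine ⟨hy, hx, ?_⟩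
        rw [hread hy hx, pv_sRule_v]
        exact Or.inr ⟨hc, hns⟩
      · rw [if_neg hcf]
        have hsrc := (hfree p0 hp0).mp (Bool.eq_false_iff.mpr hcf)
        have hh : 0 < g.length := by omega
        have hy' : (p0.1 + 1) % g.length < g.length := Nat.mod_lt _ hh
        refine ⟨hy', hx, ?_⟩
        show pvRead (pvSouthA g.length w g m0).1 ((p0.1 + 1) % g.length) p0.2 = 'v'
        rw [hread hy' hx, pv_sRule_v]
        refine Or.inl ?_
        simp only [pvTgtS, Bool.and_eq_true, beq_iff_eq]
        rw [pv_mod_succ_pred hy]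
        exact ⟨(pv_srcS_char hsrc).2, hc⟩
    · rintro ⟨hy, hx, hc⟩
      rw [hread hy hx, pv_sRule_v] at hc
      rcases hc with ht | ⟨hold, hns⟩
      · obtain ⟨hdot, hv⟩ := pv_tgtS_char ht
        have hyl : (p.1 + g.length - 1) % g.length < g.length := pv_mod_pred_lt hy
        have hp0 : ((p.1 + g.length - 1) % g.length, p.2) ∈ S := (hS _).mpr ⟨hyl, hx, hv⟩
        refine ⟨((p.1 + g.length - 1) % g.length, p.2), hp0, ?_⟩
        have hsrc : pvSrcS g g.length ((p.1 + g.length - 1) % g.length) p.2 = true := by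
          simp only [pvSrcS, Bool.and_eq_true, beq_iff_eq]
          rw [pv_mod_pred_succ hy]
          exact ⟨hv, hdot⟩
        have hcf := (hfree _ hp0).mpr hsrc
        rw [if_neg (by rw [hcf]; exact Bool.false_ne_true)]
        have : ((p.1 + g.length - 1) % g.length + 1) % g.length = p.1 := pv_mod_pred_succ hy
        ext <;> simp [this]
      · have hp0 : p ∈ S := (hS p).mpr ⟨hy, hx, hold⟩
        refine ⟨p, hp0, ?_⟩
        have hcf : PySem.Set.contains (PySem.Set.union (PySem.Set.union E S) W)
            ((p.1 + 1) % g.length, p.2) = true := by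
          by_cases hcf : PySem.Set.contains (PySem.Set.union (PySem.Set.union E S) W)
              ((p.1 + 1) % g.length, p.2) = true
          · exact hcf
          · have := (hfree p hp0).mp (Bool.eq_false_iff.mpr hcf)
            rw [this] at hns; exact absurd hns (by decide)
        rw [if_pos hcf]
  · -- wall set unchanged
    intro p
    rw [hW p]
    constructor
    · rintro ⟨hy, hx, hc⟩
      refine ⟨hy, hx, ?_⟩
      rw [hread hy hx]
      exact pv_sRule_wall.mpr hc
    · rintro ⟨hy, hx, hc⟩
      rw [hread hy hx] at hc
      exact ⟨hy, hx, pv_sRule_wall.mp hc⟩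
  · -- flags
    rw [pv_southA_eq, pv_phase_eq]
    simp only
    congr 1
    rw [Bool.eq_iff_iff, List.any_eq_true, List.any_eq_true]
    constructor
    · rintro ⟨y, hy, hin⟩
      rw [List.any_eq_true] at hin
      obtain ⟨x, hx, hsrc⟩ := hin
      rw [List.mem_range] at hy hx
      have hchar := (pv_srcS_char hsrc).1
      have hp : ((y, x) : Nat × Nat) ∈ S := (hS _).mpr ⟨hy, hx, hchar⟩
      exact ⟨(y, x), hp, by rw [(hfree _ hp).mpr hsrc]; rfl⟩
    · rintro ⟨p, hp, hb⟩
      have hcf : PySem.Set.contains (PySem.Set.union (PySem.Set.union E S) W)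
          ((p.1 + 1) % g.length, p.2) = false := by
        cases hx : PySem.Set.contains (PySem.Set.union (PySem.Set.union E S) W)
            ((p.1 + 1) % g.length, p.2) with
        | false => rfl
        | true => rw [hx] at hb; exact absurd hb (by decide)
      have hsrc := (hfree p hp).mp hcf
      obtain ⟨hy, hx, _⟩ := (hS p).mp hp
      exact ⟨p.1, List.mem_range.mpr hy,
        List.any_eq_true.mpr ⟨p.2, List.mem_range.mpr hx, hsrc⟩⟩

-- ---- the two while-loops agree step for step ----
theorem pv_go_eq (h w : Nat) :
    ∀ (fuel : Nat) (step : Int) (g : List (List Char)) (E S W : List (Nat × Nat)),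
      pvInv h w g E S W → pvGoA h w fuel step g = pvGoB h w fuel step E S W := by
  intro fuel
  induction fuel with
  | zero => intro step g E S W _; rfl
  | succ n ih =>
    intro step g E S W hinv
    obtain ⟨hie, hfe⟩ := pv_inv_east hinv
    obtain ⟨his, hfs⟩ := pv_inv_south hie ((pvEastA h w g).2)
    show (let e := pvEastA h w g
          let s := pvSouthA h w e.1 e.2
          if s.2 then pvGoA h w n (step + 1) s.1 else step + 1)
        = (let e := pvPhase E (PySem.Set.union (PySem.Set.union E S) W)
              (fun p => (p.1, (p.2 + 1) % w))
           let s := pvPhase S (PySem.Set.union (PySem.Set.union e.1 S) W)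
              (fun p => ((p.1 + 1) % h, p.2))
           if e.2 || s.2 then pvGoB h w n (step + 1) e.1 s.1 W else step + 1)
    simp only []
    rw [hfs, ← hfe]
    by_cases hflag : ((pvEastA h w g).2 ||
      (pvPhase S (PySem.Set.union (PySem.Set.union
          (pvPhase E (PySem.Set.union (PySem.Set.union E S) W)
            (fun p => (p.1, (p.2 + 1) % w))).1 S) W)
        (fun p => ((p.1 + 1) % h, p.2))).2) = true
    · rw [if_pos hflag, if_pos hflag]
      exact ih (step + 1) _ _ _ _ his
    · rw [if_neg hflag, if_neg hflag]

-- ---- initial sets: membership in the parsing fold ----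
theorem pv_build_mem (lines : List String) (h w : Nat) :
    (∀ q : Nat × Nat, q ∈ (pvBuildB lines h w).1 ↔
        q.1 < h ∧ q.2 < w ∧ ((lines.getD q.1 "").toList).getD q.2 ' ' = '>') ∧
    (∀ q : Nat × Nat, q ∈ (pvBuildB lines h w).2.1 ↔
        q.1 < h ∧ q.2 < w ∧ ((lines.getD q.1 "").toList).getD q.2 ' ' = 'v') ∧
    (∀ q : Nat × Nat, q ∈ (pvBuildB lines h w).2.2 ↔
        q.1 < h ∧ q.2 < w ∧ ((lines.getD q.1 "").toList).getD q.2 ' ' ≠ '.' ∧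
          ((lines.getD q.1 "").toList).getD q.2 ' ' ≠ '>' ∧
          ((lines.getD q.1 "").toList).getD q.2 ' ' ≠ 'v') := by
  refine ⟨?_, ?_, ?_⟩
  · intro q
    unfold pvBuildB
    rw [pv_foldl_proj1 _ (fun s y => (List.range w).foldl (fun s x =>
        if ((lines.getD y "").toList).getD x ' ' == '>' then PySem.Set.add s (y, x) else s) s)
      (by
        intro acc y
        exact pv_foldl_proj1 _ _ (by
          intro acc2 x
          simp only
          by_cases h1 : ((lines.getD y "").toList).getD x ' ' == '>'
          · rw [if_pos h1, if_pos h1]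
          · rw [if_neg h1, if_neg h1]
            by_cases h2 : ((lines.getD y "").toList).getD x ' ' == 'v'
            · rw [if_pos h2]
            · rw [if_neg h2]
              by_cases h3 : ((lines.getD y "").toList).getD x ' ' != '.'
              · rw [if_pos h3]
              · rw [if_neg h3]) _ _) _]
    rw [pv_mem_foldl_of_step _
      (fun (y : Nat) (q : Nat × Nat) => ∃ x ∈ List.range w,
        (((lines.getD y "").toList).getD x ' ' = '>' ∧ q = (y, x)))
      (by
        intro s y q
        rw [pv_mem_foldl_of_step _
          (fun (x : Nat) (q : Nat × Nat) =>
            ((lines.getD y "").toList).getD x ' ' = '>' ∧ q = (y, x))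
          (by
            intro s2 x q2
            by_cases h1 : ((lines.getD y "").toList).getD x ' ' == '>'
            · rw [if_pos h1, PySem.Set.mem_add]
              simp only [beq_iff_eq] at h1
              constructor
              · rintro (hq | rfl)
                · exact Or.inl hq
                · exact Or.inr ⟨h1, rfl⟩
              · rintro (hq | ⟨_, rfl⟩)
                · exact Or.inl hq
                · exact Or.inr rfl
            · rw [if_neg h1]
              simp only [beq_iff_eq] at h1
              constructor
              · exact Or.inl
              · rintro (hq | ⟨hc, _⟩)
                · exact hq
                · exact absurd hc h1) _ _])
      _ _]
    simp only [List.mem_range, PySem.Set.empty, List.not_mem_nil, false_or]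
    constructor
    · rintro ⟨y, hy, x, hx, hc, rfl⟩
      exact ⟨hy, hx, hc⟩
    · rintro ⟨h1, h2, h3⟩
      exact ⟨q.1, h1, q.2, h2, h3, rfl⟩
  · intro q
    unfold pvBuildB
    rw [pv_foldl_proj2 _ (fun s y => (List.range w).foldl (fun s x =>
        if ((lines.getD y "").toList).getD x ' ' == 'v' then PySem.Set.add s (y, x) else s) s)
      (by
        intro acc y
        exact pv_foldl_proj2 _ _ (by
          intro acc2 x
          simp only
          by_cases h1 : ((lines.getD y "").toList).getD x ' ' == '>'
          · rw [if_pos h1]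
            have : ¬ (((lines.getD y "").toList).getD x ' ' == 'v') = true := by
              simp only [beq_iff_eq] at h1 ⊢; rw [h1]; decide
            rw [if_neg this]
          · rw [if_neg h1]
            by_cases h2 : ((lines.getD y "").toList).getD x ' ' == 'v'
            · rw [if_pos h2, if_pos h2]
            · rw [if_neg h2, if_neg h2]
              by_cases h3 : ((lines.getD y "").toList).getD x ' ' != '.'
              · rw [if_pos h3]
              · rw [if_neg h3]) _ _) _]
    rw [pv_mem_foldl_of_step _
      (fun (y : Nat) (q : Nat × Nat) => ∃ x ∈ List.range w,
        (((lines.getD y "").toList).getD x ' ' = 'v' ∧ q = (y, x)))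
      (by
        intro s y q
        rw [pv_mem_foldl_of_step _
          (fun (x : Nat) (q : Nat × Nat) =>
            ((lines.getD y "").toList).getD x ' ' = 'v' ∧ q = (y, x))
          (by
            intro s2 x q2
            by_cases h1 : ((lines.getD y "").toList).getD x ' ' == 'v'
            · rw [if_pos h1, PySem.Set.mem_add]
              simp only [beq_iff_eq] at h1
              constructor
              · rintro (hq | rfl)
                · exact Or.inl hq
                · exact Or.inr ⟨h1, rfl⟩
              · rintro (hq | ⟨_, rfl⟩)
                · exact Or.inl hq
                · exact Or.inr rfl
            · rw [if_neg h1]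
              simp only [beq_iff_eq] at h1
              constructor
              · exact Or.inl
              · rintro (hq | ⟨hc, _⟩)
                · exact hq
                · exact absurd hc h1) _ _])
      _ _]
    simp only [List.mem_range, PySem.Set.empty, List.not_mem_nil, false_or]
    constructor
    · rintro ⟨y, hy, x, hx, hc, rfl⟩
      exact ⟨hy, hx, hc⟩
    · rintro ⟨h1, h2, h3⟩
      exact ⟨q.1, h1, q.2, h2, h3, rfl⟩
  · intro q
    unfold pvBuildB
    rw [pv_foldl_proj3 _ (fun s y => (List.range w).foldl (fun s x =>
        if (((lines.getD y "").toList).getD x ' ' != '.')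
            && !(((lines.getD y "").toList).getD x ' ' == '>')
            && !(((lines.getD y "").toList).getD x ' ' == 'v')
          then PySem.Set.add s (y, x) else s) s)
      (by
        intro acc y
        exact pv_foldl_proj3 _ _ (by
          intro acc2 x
          simp only
          by_cases h1 : ((lines.getD y "").toList).getD x ' ' == '>'
          · rw [if_pos h1]
            have : ¬ ((((lines.getD y "").toList).getD x ' ' != '.')
                && !(((lines.getD y "").toList).getD x ' ' == '>')
                && !(((lines.getD y "").toList).getD x ' ' == 'v')) = true := by
              intro hcon
              rw [Bool.and_eq_true, Bool.and_eq_true] at hcon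
              have h4 := hcon.1.2
              rw [Bool.not_eq_true', beq_eq_false_iff_ne] at h4
              exact h4 (by simpa using h1)
            rw [if_neg this]
          · rw [if_neg h1]
            by_cases h2 : ((lines.getD y "").toList).getD x ' ' == 'v'
            · rw [if_pos h2]
              have : ¬ ((((lines.getD y "").toList).getD x ' ' != '.')
                  && !(((lines.getD y "").toList).getD x ' ' == '>')
                  && !(((lines.getD y "").toList).getD x ' ' == 'v')) = true := by
                intro hcon
                rw [Bool.and_eq_true] at hcon
                have h4 := hcon.2
                rw [Bool.not_eq_true', beq_eq_false_iff_ne] at h4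
                exact h4 (by simpa using h2)
              rw [if_neg this]
            · rw [if_neg h2]
              by_cases h3 : ((lines.getD y "").toList).getD x ' ' != '.'
              · rw [if_pos h3]
                have : ((((lines.getD y "").toList).getD x ' ' != '.')
                    && !(((lines.getD y "").toList).getD x ' ' == '>')
                    && !(((lines.getD y "").toList).getD x ' ' == 'v')) = true := by
                  simp only [Bool.and_eq_true, Bool.not_eq_true'] at *
                  exact ⟨⟨h3, Bool.eq_false_iff.mpr h1⟩, Bool.eq_false_iff.mpr h2⟩
                rw [if_pos this]
              · rw [if_neg h3]
                have : ¬ ((((lines.getD y "").toList).getD x ' ' != '.')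
                    && !(((lines.getD y "").toList).getD x ' ' == '>')
                    && !(((lines.getD y "").toList).getD x ' ' == 'v')) = true := by
                  simp only [Bool.and_eq_true, not_and]
                  intro hcon _
                  exact absurd hcon.1 h3
                rw [if_neg this]) _ _) _]
    rw [pv_mem_foldl_of_step _
      (fun (y : Nat) (q : Nat × Nat) => ∃ x ∈ List.range w,
        ((((lines.getD y "").toList).getD x ' ' ≠ '.' ∧
          ((lines.getD y "").toList).getD x ' ' ≠ '>' ∧
          ((lines.getD y "").toList).getD x ' ' ≠ 'v') ∧ q = (y, x)))
      (by
        intro s y q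
        rw [pv_mem_foldl_of_step _
          (fun (x : Nat) (q : Nat × Nat) =>
            (((lines.getD y "").toList).getD x ' ' ≠ '.' ∧
             ((lines.getD y "").toList).getD x ' ' ≠ '>' ∧
             ((lines.getD y "").toList).getD x ' ' ≠ 'v') ∧ q = (y, x))
          (by
            intro s2 x q2
            by_cases h1 : ((((lines.getD y "").toList).getD x ' ' != '.')
                && !(((lines.getD y "").toList).getD x ' ' == '>')
                && !(((lines.getD y "").toList).getD x ' ' == 'v')) = true
            · rw [if_pos h1, PySem.Set.mem_add]
              simp only [Bool.and_eq_true, bne_iff_ne, Bool.not_eq_true', beq_eq_false_iff_ne]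
                at h1
              constructor
              · rintro (hq | rfl)
                · exact Or.inl hq
                · exact Or.inr ⟨⟨h1.1.1, h1.1.2, h1.2⟩, rfl⟩
              · rintro (hq | ⟨_, rfl⟩)
                · exact Or.inl hq
                · exact Or.inr rfl
            · rw [if_neg h1]
              simp only [Bool.and_eq_true, bne_iff_ne, Bool.not_eq_true', beq_eq_false_iff_ne,
                not_and] at h1
              constructor
              · exact Or.inl
              · rintro (hq | ⟨⟨hc1, hc2, hc3⟩, _⟩)
                · exact hq
                · exact absurd hc3 (h1 ⟨hc1, hc2⟩)) _ _])
      _ _]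
    simp only [List.mem_range, PySem.Set.empty, List.not_mem_nil, false_or]
    constructor
    · rintro ⟨y, hy, x, hx, hc, rfl⟩
      exact ⟨hy, hx, hc⟩
    · rintro ⟨h1, h2, h3⟩
      exact ⟨q.1, h1, q.2, h2, h3, rfl⟩

-- getD bridge between the string list and A's char grid
theorem pv_getD_map_toList (lines : List String) (y : Nat) :
    (lines.map (fun l => l.toList)).getD y [] = (lines.getD y "").toList := by
  rw [List.getD_eq_getElem?_getD, List.getD_eq_getElem?_getD, List.getElem?_map]
  cases lines[y]? <;> simp

-- ===== VERDICT (by name: the statement is the Claim_ definition above) =====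
theorem simulate_sea_cucumbers_spec : Claim_equal_simulate_sea_cucumbers := by
  intro lines _hdom hpre
  obtain ⟨hne, hrows, _hterm⟩ := hpre
  unfold Spec_simulate_sea_cucumbers simulate_sea_cucumbers simulate_sea_cucumbers_alt
  simp only []
  have hlen : (lines.map (fun l => l.toList)).length = lines.length := List.length_map _
  have hhead : ((lines.map (fun l => l.toList)).headD []) = (lines.headD "").toList := by
    cases lines with
    | nil => exact absurd rfl hne
    | cons a t => rfl
  rw [hlen, hhead]
  obtain ⟨hbE, hbS, hbW⟩ :=
    pv_build_mem lines lines.length (lines.headD "").toList.length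
  apply pv_go_eq
  refine ⟨List.length_map _, ?_, ?_, ?_, ?_⟩
  · intro r hr
    obtain ⟨l, hl, rfl⟩ := List.mem_map.mp hr
    exact hrows l hl
  · intro p
    rw [hbE p, pvRead, pv_getD_map_toList]
  · intro p
    rw [hbS p, pvRead, pv_getD_map_toList]
  · intro p
    rw [hbW p, pvRead, pv_getD_map_toList]
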